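-- pv_equiv track=rewrite | github.com/manas-17045/LeetcodeSolutions | Leetcode 3001-3100/3008/3008.py | beautifulIndices
-- ===== SOURCE A (Python) =====
-- def beautifulIndices(s: str, a: str, b: str, k: int) -> list[int]:
--     """
--     Finds "beautiful" indices in a string `s`. An index `i` is beautiful if `s[i:i+len(a)] == a`
--     and there exists an index `j` such that `s[j:j+len(b)] == b` and `|i - j| <= k`.
--     :param s: The main string to search within.
--     :param a: The first pattern string.
--     :param b: The second pattern string.
--     :param k: The maximum allowed absolute difference between indices `i` and `j`.
--     :return: A list of beautiful indices in ascending order.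
--     """
--     def computeLPS(pattern):
--         m = len(pattern)
--         lps = [0] * m
--         length = 0
--         i = 1
--         while i < m:
--             if pattern[i] == pattern[length]:
--                 length += 1
--                 lps[i] = length
--                 i += 1
--             else:
--                 if length != 0:
--                     length = lps[length - 1]
--                 else:
--                     lps[i] = 0
--                     i += 1
--         return lps
--
--     def kmpSearch(text, pattern):
--         n = len(text)
--         m = len(pattern)
--         lps = computeLPS(pattern)
--         indices = []
--         i = 0
--         j = 0
--         while i < n:
--             if pattern[j] == text[i]:
--                 i += 1
--                 j += 1
--             if j == m:
--                 indices.append(i - j)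
--                 j = lps[j - 1]
--             elif i < n and pattern[j] != text[i]:
--                 if j != 0:
--                     j = lps[j - 1]
--                 else:
--                     i += 1
--
--         return indices
--
--     indicesA = kmpSearch(s, a)
--     indicesB = kmpSearch(s, b)
--
--     ans = []
--     bIndex = 0
--     lenB = len(indicesB)
--
--     for i in indicesA:
--         while bIndex < lenB and indicesB[bIndex] < i - k:
--             bIndex += 1
--         if bIndex < lenB and abs(indicesB[bIndex] - i) <= k:
--             ans.append(i)
--
--     return ans
-- ===== SOURCE B (Python) =====
-- def beautifulIndices(s: str, a: str, b: str, k: int) -> list[int]: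
--     """Find-loop matching plus binary search instead of KMP plus a two-pointer merge."""
--
--     def matches(pat):
--         res = []
--         start = 0
--         while True:
--             pos = s.find(pat, start)
--             if pos == -1:
--                 return res
--             res.append(pos)
--             start = pos + 1
--
--     ia = matches(a)
--     ib = matches(b)
--     ans = []
--     for i in ia:
--         # first index in the ascending list ib whose value is >= i - k
--         lo, hi = 0, len(ib)
--         while lo < hi:
--             mid = (lo + hi) // 2
--             if ib[mid] < i - k:
--                 lo = mid + 1
--             else:
--                 hi = mid
--         if lo < len(ib) and ib[lo] <= i + k:
--             ans.append(i)
--     return ans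
-- ===== Notes on version B (the rewrite author's own statement) =====
-- stated objective: faster
-- what changed: Replaces A's hand-written KMP (LPS table + KMP scan) and stateful two-pointer merge by collecting overlapping match positions with a s.find(pat, start) loop and, for each a-index, a binary search for the first b-index >= i - k.
-- outside the precondition, e.g. on beautifulIndices('', '', '', 0): A returns [], B returns [0]; on beautifulIndices('', 'a', '', 0): A returns [], B returns []
import Mathlib
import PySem

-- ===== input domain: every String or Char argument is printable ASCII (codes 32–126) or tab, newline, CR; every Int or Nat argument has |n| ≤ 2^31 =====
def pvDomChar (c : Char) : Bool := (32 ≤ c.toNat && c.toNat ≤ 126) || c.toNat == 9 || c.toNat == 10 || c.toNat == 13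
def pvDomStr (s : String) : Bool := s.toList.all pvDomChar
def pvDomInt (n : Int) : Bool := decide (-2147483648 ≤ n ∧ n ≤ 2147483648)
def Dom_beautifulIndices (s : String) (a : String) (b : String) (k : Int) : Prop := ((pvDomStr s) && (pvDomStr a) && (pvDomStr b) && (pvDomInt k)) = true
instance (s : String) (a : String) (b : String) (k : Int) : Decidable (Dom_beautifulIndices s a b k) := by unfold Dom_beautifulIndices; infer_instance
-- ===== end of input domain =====

-- B replaces A's KMP matcher and two-pointer merge by find-loop substring matching (PySem.Chars.findFrom,
-- i.e. Python's s.find(pat, start)) and a per-index binary search for the first b-match ≥ i - k; equal on Pre_.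

-- ===== PORT A =====
def pvLpsGo (p : List Char) : Nat → List Nat → Nat → Nat → List Nat
  | 0, lps, _, _ => lps
  | fuel+1, lps, len, i =>
    if i < p.length then
      if p[i]? = p[len]? then pvLpsGo p fuel (lps.set i (len+1)) (len+1) (i+1)
      else if len ≠ 0 then pvLpsGo p fuel lps (lps.getD (len-1) 0) i
      else pvLpsGo p fuel (lps.set i 0) 0 (i+1)
    else lps

def pvComputeLPS (p : List Char) : List Nat :=
  pvLpsGo p (2 * p.length) (List.replicate p.length 0) 0 1

def pvKmpGo (t p : List Char) (lps : List Nat) : Nat → Nat → Nat → List Nat → List Nat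
  | 0, _, _, acc => acc
  | fuel+1, i, j, acc =>
    if i < t.length then
      let ij := if p[j]? = t[i]? then (i+1, j+1) else (i, j)
      if ij.2 = p.length then
        pvKmpGo t p lps fuel ij.1 (lps.getD (ij.2 - 1) 0) (acc ++ [ij.1 - ij.2])
      else if ij.1 < t.length ∧ ¬ (p[ij.2]? = t[ij.1]?) then
        if ij.2 ≠ 0 then pvKmpGo t p lps fuel ij.1 (lps.getD (ij.2 - 1) 0) acc
        else pvKmpGo t p lps fuel (ij.1 + 1) ij.2 acc
      else pvKmpGo t p lps fuel ij.1 ij.2 acc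
    else acc

def pvKmpSearch (t p : List Char) : List Nat :=
  pvKmpGo t p (pvComputeLPS p) (2 * t.length + 1) 0 0 []

def pvAdvanceA (ib : List Nat) (tgt : Int) (x : Nat) : Nat :=
  if h : x < ib.length ∧ ((ib.getD x 0 : Nat) : Int) < tgt then pvAdvanceA ib tgt (x+1) else x
termination_by ib.length - x
decreasing_by omega

def pvSelGoA (ib : List Nat) (k : Int) : List Nat → Nat → List Int → List Int
  | [], _, ans => ans
  | i :: rest, bIdx, ans =>
    let b1 := pvAdvanceA ib ((i : Int) - k) bIdx
    let ans' := if b1 < ib.length ∧ |((ib.getD b1 0 : Nat) : Int) - (i : Int)| ≤ k then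
        ans ++ [(i : Int)] else ans
    pvSelGoA ib k rest b1 ans'

def beautifulIndices (s : String) (a : String) (b : String) (k : Int) : List Int :=
  let indicesA := pvKmpSearch s.toList a.toList
  let indicesB := pvKmpSearch s.toList b.toList
  pvSelGoA indicesB k indicesA 0 []

-- ===== PORT B =====
def pvFindAllGo (t p : List Char) : Nat → Nat → List Nat → List Nat
  | 0, _, acc => acc
  | fuel+1, start, acc =>
    let pos := PySem.Chars.findFrom t p (start : Int) none
    if pos = -1 then acc else pvFindAllGo t p fuel (pos.toNat + 1) (acc ++ [pos.toNat])

def pvFindAll (t p : List Char) : List Nat := pvFindAllGo t p (t.length + 2) 0 []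

-- fuel = hi - lo + 1 bounds the number of loop iterations (hi - lo shrinks every round);
-- it only makes the structural recursion total and never changes the computed value
def pvLbound (ib : List Nat) (tgt : Int) : Nat → Nat → Nat → Nat
  | 0, lo, _ => lo
  | fuel+1, lo, hi =>
    if lo < hi then
      let mid := (lo + hi) / 2
      if ((ib.getD mid 0 : Nat) : Int) < tgt then pvLbound ib tgt fuel (mid+1) hi
      else pvLbound ib tgt fuel lo mid
    else lo

def beautifulIndices_alt (s : String) (a : String) (b : String) (k : Int) : List Int :=
  let ia := pvFindAll s.toList a.toList
  let ib := pvFindAll s.toList b.toList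
  ia.foldl (fun (ans : List Int) (i : Nat) =>
    let lo := pvLbound ib ((i : Int) - k) (ib.length + 1) 0 ib.length
    if lo < ib.length ∧ ((ib.getD lo 0 : Nat) : Int) ≤ (i : Int) + k then ans ++ [(i : Int)]
    else ans) []

-- ===== PRECONDITION & SPEC =====
-- Pre_ excludes empty patterns: A raises IndexError on them whenever s is nonempty, and in the
-- degenerate remaining corner (s empty) A's [] and B's [0] (the empty pattern matches at index 0)
-- are both defensible readings of matching an empty pattern.
def Pre_beautifulIndices (s : String) (a : String) (b : String) (k : Int) : Prop := a ≠ "" ∧ b ≠ ""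
instance (s : String) (a : String) (b : String) (k : Int) : Decidable (Pre_beautifulIndices s a b k) := by unfold Pre_beautifulIndices; infer_instance

def pvWitness_beautifulIndices : String × String × String × Int := ("abacaba", "ab", "ba", 2)

def Spec_beautifulIndices (s : String) (a : String) (b : String) (k : Int) (out : List Int) : Prop := out = beautifulIndices_alt s a b k
instance (s : String) (a : String) (b : String) (k : Int) (out : List Int) : Decidable (Spec_beautifulIndices s a b k out) := by unfold Spec_beautifulIndices; infer_instance

-- ===== CLAIM (what is proved, stated in full; the proofs are below) =====
def Claim_equal_beautifulIndices : Prop := ∀ (s : String) (a : String) (b : String) (k : Int), Dom_beautifulIndices s a b k → Pre_beautifulIndices s a b k → Spec_beautifulIndices s a b k (beautifulIndices s a b k)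

-- ===== LEMMAS AND PROOFS =====

abbrev pvBorderP (p : List Char) (q l : Nat) : Prop := p.take l = (p.take q).drop (q - l)

def pvBrd (p : List Char) (q : Nat) : Nat := Nat.findGreatest (pvBorderP p q) (q - 1)

lemma pvBorderP_zero (p : List Char) (q : Nat) : pvBorderP p q 0 := by
  simp [pvBorderP, List.drop_eq_nil_of_le]

lemma pvBrd_lt (p : List Char) {q : Nat} (h : 1 ≤ q) : pvBrd p q < q := by
  have := Nat.findGreatest_le (P := pvBorderP p q) (q - 1); unfold pvBrd; omega

lemma pvBrd_spec (p : List Char) (q : Nat) : pvBorderP p q (pvBrd p q) :=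
  Nat.findGreatest_spec (Nat.zero_le _) (pvBorderP_zero p q)

lemma pvBrd_max (p : List Char) {q l : Nat} (hq : 1 ≤ q) (hl : l < q) (h : pvBorderP p q l) :
    l ≤ pvBrd p q := Nat.le_findGreatest (by omega) h

lemma pvExt {p t : List Char} {l i : Nat} (hl : l ≤ i) (hi : i ≤ t.length)
    (h : p.take l = (t.take i).drop (i - l)) (hc : p[l]? = t[i]?) :
    p.take (l+1) = (t.take (i+1)).drop (i + 1 - (l+1)) := by
  have hlen : (t.take i).length = i := by simp; omega
  rw [List.take_add_one, List.take_add_one, show i + 1 - (l+1) = i - l by omega,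
      List.drop_append_of_le_length (by omega), ← h, ← hc]

lemma pvDown {p t : List Char} {l i : Nat} (hl1 : 1 ≤ l) (hl : l ≤ i + 1) (hi : i < t.length)
    (hlp : l ≤ p.length)
    (h : p.take l = (t.take (i+1)).drop (i + 1 - l)) :
    p.take (l-1) = (t.take i).drop (i - (l-1)) ∧ p[l-1]? = t[i]? := by
  have hlen : (t.take i).length = i := by simp; omega
  have h1 : p.take l = p.take (l-1) ++ p[l-1]?.toList := by
    conv_lhs => rw [show l = (l-1)+1 by omega, List.take_add_one]
  have hidx : i - (l-1) = i + 1 - l := by omega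
  have h2 : (t.take (i+1)).drop (i + 1 - l)
      = (t.take i).drop (i + 1 - l) ++ t[i]?.toList := by
    rw [List.take_add_one, List.drop_append_of_le_length (by rw [hlen]; omega)]
  rw [h1, h2] at h
  have hlen1 : (p.take (l-1)).length = ((t.take i).drop (i + 1 - l)).length := by
    simp; omega
  obtain ⟨h3, h4⟩ := List.append_inj h hlen1
  refine ⟨by rw [hidx]; exact h3, ?_⟩
  have hps : p[l-1]? = some p[l-1] := List.getElem?_eq_getElem (by omega)
  have hts : t[i]? = some t[i] := List.getElem?_eq_getElem hi
  rw [hps, hts] at h4 ⊢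
  simpa using h4

lemma pvNestT {p t : List Char} {l1 l2 i : Nat}
    (h1 : p.take l1 = (t.take i).drop (i - l1)) (h2 : p.take l2 = (t.take i).drop (i - l2))
    (hl : l1 ≤ l2) (hl2 : l2 ≤ i) :
    p.take l1 = (p.take l2).drop (l2 - l1) := by
  rw [h2, List.drop_drop, show i - l2 + (l2 - l1) = i - l1 by omega]; exact h1

lemma pvOccLen {p t : List Char} {q : Nat} (hocc : p <+: t.drop q) (hp : p ≠ []) :
    q + p.length ≤ t.length := by
  have h1 := hocc.length_le
  simp at h1
  rcases Nat.lt_or_ge q t.length with h | h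
  · omega
  · exfalso
    have : t.drop q = [] := List.drop_eq_nil_of_le h
    rw [this, List.prefix_nil] at hocc; exact hp hocc

lemma pvOccTake {p t : List Char} {q : Nat} (hocc : p <+: t.drop q) :
    p = (t.drop q).take p.length := List.prefix_iff_eq_take.mp hocc

lemma pvOccSuffix {p t : List Char} {q l i : Nat} (hocc : p <+: t.drop q) (hq : q + l = i)
    (hl : l ≤ p.length) :
    p.take l = (t.take i).drop (i - l) := by
  have h1 : p.take l = (t.drop q).take l := by
    rw [pvOccTake hocc, List.take_take, Nat.min_eq_left hl]
  rw [h1, show i - l = q by omega, List.drop_take]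
  congr 1; omega

lemma pvOccChar {p t : List Char} {q x : Nat} (hocc : p <+: t.drop q) (hx : x < p.length) :
    p[x]? = t[q+x]? := by
  conv_lhs => rw [pvOccTake hocc]
  rw [List.getElem?_take_of_lt hx, List.getElem?_drop]

lemma pvLpsGo_correct (p : List Char) :
    ∀ fuel lps len i,
    1 ≤ i → i ≤ p.length → len < i → lps.length = p.length →
    (∀ x, x < i → lps.getD x 0 = pvBrd p (x+1)) →
    p.take len = (p.take i).drop (i - len) →
    (∀ bb, len < bb → bb < i → p.take bb = (p.take i).drop (i - bb) → ¬ (p[bb]? = p[i]?)) →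
    2 * (p.length - i) + len + 1 ≤ fuel →
    ∀ x, x < p.length → (pvLpsGo p fuel lps len i).getD x 0 = pvBrd p (x+1) := by
  intro fuel
  induction fuel with
  | zero => intro lps len i h1 h2 h3 h4 h5 h6 h7 hf; omega
  | succ f ih =>
    intro lps len i h1 h2 h3 h4 h5 h6 h7 hf x hx
    rw [pvLpsGo]
    by_cases hi : i < p.length
    · simp only [hi, if_true]
      by_cases hc : p[i]? = p[len]?
      · -- match: extend border
        simp only [hc, if_true]
        have hbord : p.take (len+1) = (p.take (i+1)).drop (i + 1 - (len+1)) :=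
          pvExt (by omega) (le_of_lt hi) h6 hc.symm
        have hnone : ∀ nn, len + 1 < nn → nn ≤ i → ¬ pvBorderP p (i+1) nn := by
          intro nn hn1 hn2 hP
          obtain ⟨hb, hcc⟩ := pvDown (by omega) (by omega) hi (by omega) hP
          exact h7 (nn-1) (by omega) (by omega) hb hcc
        have hbrd : pvBrd p (i+1) = len + 1 := by
          unfold pvBrd
          rw [Nat.findGreatest_eq_iff]
          exact ⟨by omega, fun _ => hbord, fun {nn} hn1 hn2 => hnone nn hn1 (by omega)⟩
        apply ih (lps.set i (len+1)) (len+1) (i+1) (by omega) (by omega) (by omega)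
          (by simp [h4]) ?_ hbord ?_ (by omega) x hx
        · intro y hy
          rcases Nat.lt_or_ge y i with hyi | hyi
          · rw [List.getD, List.getElem?_set_ne (by omega)]
            exact h5 y hyi
          · have hyeq : y = i := by omega
            subst hyeq
            rw [List.getD, List.getElem?_set_self (by omega)]
            simp [hbrd]
        · intro bb hb1 hb2 hb3
          exact absurd hb3 (hnone bb hb1 (by omega))
      · simp only [hc, if_false]
        by_cases hl0 : len = 0
        · -- len = 0 mismatch: advance
          subst hl0
          rw [if_neg (fun h => h rfl)]
          have hnone : ∀ nn, 0 < nn → nn ≤ i → ¬ pvBorderP p (i+1) nn := by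
            intro nn hn1 hn2 hP
            obtain ⟨hb, hcc⟩ := pvDown (by omega) (by omega) hi (by omega) hP
            rcases Nat.eq_or_lt_of_le hn1 with he | hlt
            · rw [← he] at hcc; exact hc hcc.symm
            · exact h7 (nn-1) (by omega) (by omega) hb hcc
          have hbrd : pvBrd p (i+1) = 0 := by
            unfold pvBrd
            rw [Nat.findGreatest_eq_iff]
            exact ⟨by omega, by simp, fun {nn} hn1 hn2 => hnone nn hn1 (by omega)⟩
          apply ih (lps.set i 0) 0 (i+1) (by omega) (by omega) (by omega)
            (by simp [h4]) ?_ ?_ ?_ (by omega) x hx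
          · intro y hy
            rcases Nat.lt_or_ge y i with hyi | hyi
            · rw [List.getD, List.getElem?_set_ne (by omega)]
              exact h5 y hyi
            · have hyeq : y = i := by omega
              subst hyeq
              rw [List.getD, List.getElem?_set_self (by omega)]
              simp [hbrd]
          · simp [List.drop_eq_nil_of_le]
          · intro bb hb1 hb2 hb3
            exact absurd hb3 (hnone bb hb1 (by omega))
        · -- len ≠ 0 mismatch: fall back
          simp only [if_pos hl0]
          have hlg : lps.getD (len-1) 0 = pvBrd p len := by
            rw [h5 (len-1) (by omega), show len - 1 + 1 = len by omega]
          have hbl : pvBrd p len < len := pvBrd_lt p (by omega)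
          have hb1 : p.take (pvBrd p len) = (p.take len).drop (len - pvBrd p len) :=
            pvBrd_spec p len
          have hbord : p.take (pvBrd p len) = (p.take i).drop (i - pvBrd p len) := by
            rw [hb1, h6, List.drop_drop, show i - len + (len - pvBrd p len) = i - pvBrd p len by omega]
          rw [hlg]
          apply ih lps (pvBrd p len) i h1 h2 (by omega) h4 h5 hbord ?_ (by omega) x hx
          intro bb hbb1 hbb2 hbb3
          rcases Nat.lt_trichotomy bb len with hlt | heq | hgt
          · exfalso
            have : pvBorderP p len bb := pvNestT hbb3 h6 (by omega) (by omega)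
            have := pvBrd_max p (by omega) hlt this
            omega
          · subst heq; exact fun h => hc h.symm
          · exact h7 bb hgt hbb2 hbb3
    · simp only [hi, if_false]
      exact h5 x (by omega)

lemma pvComputeLPS_correct (p : List Char) (hp : p ≠ []) :
    ∀ x, x < p.length → (pvComputeLPS p).getD x 0 = pvBrd p (x+1) := by
  have hm : 1 ≤ p.length := by
    cases p with | nil => exact absurd rfl hp | cons c l => simp
  apply pvLpsGo_correct p (2 * p.length) (List.replicate p.length 0) 0 1
    (le_refl _) hm (by omega) (by simp) ?_ (by simp [List.drop_eq_nil_of_le]) ?_ (by omega)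
  · intro x hx
    have hx0 : x = 0 := by omega
    subst hx0
    rw [List.getD, List.getElem?_replicate_of_lt (by omega)]
    simp [pvBrd, Nat.findGreatest_zero]
  · intro bb h1 h2; omega

lemma pvSuffixOcc {p t : List Char} {i1 : Nat} (hm : p.length ≤ i1)
    (h : p = (t.take i1).drop (i1 - p.length)) : p <+: t.drop (i1 - p.length) := by
  rw [List.drop_take, show i1 - (i1 - p.length) = p.length by omega] at h
  conv_lhs => rw [h]
  exact List.take_prefix _ _

lemma pvFallSM {p t : List Char} {j i : Nat} (hj : 1 ≤ j) (hji : j ≤ i)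
    (h : p.take j = (t.take i).drop (i - j)) :
    p.take (pvBrd p j) = (t.take i).drop (i - pvBrd p j) := by
  have hb := pvBrd_spec p j
  have hlt := pvBrd_lt p hj
  rw [pvBorderP] at hb
  rw [hb, h, List.drop_drop, show i - j + (j - pvBrd p j) = i - pvBrd p j by omega]

lemma pvKmpGo_correct (t p : List Char) (hp : p ≠ []) (lps : List Nat)
    (hlps : ∀ x, x < p.length → lps.getD x 0 = pvBrd p (x+1)) :
    ∀ fuel i j acc,
    j < p.length → j ≤ i → i ≤ t.length →
    p.take j = (t.take i).drop (i - j) →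
    (∀ q, p <+: t.drop q → q + p.length ≤ i ∨ i - j ≤ q) →
    acc = (List.range (i + 1 - p.length)).filter (fun q => decide (p <+: t.drop q)) →
    2 * (t.length - i) + j + 1 ≤ fuel →
    pvKmpGo t p lps fuel i j acc
      = (List.range (t.length + 1 - p.length)).filter (fun q => decide (p <+: t.drop q)) := by
  have hm : 1 ≤ p.length := List.length_pos_iff.mpr hp
  intro fuel
  induction fuel with
  | zero => intro i j acc h1 h2 h3 h4 h5 h6 hf; omega
  | succ f ih =>
    intro i j acc h1 h2 h3 h4 h5 h6 hf
    rw [pvKmpGo]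
    by_cases hi : i < t.length
    case neg =>
      simp only [if_neg hi]
      have hie : i = t.length := by omega
      subst hie
      exact h6
    simp only [if_pos hi]
    by_cases hc : p[j]? = t[i]?
    · -- characters match: advance both
      simp only [if_pos hc]
      have hSM1 : p.take (j+1) = (t.take (i+1)).drop (i + 1 - (j+1)) :=
        pvExt h2 (le_of_lt hi) h4 hc
      have hM1 : ∀ q, p <+: t.drop q → q + p.length ≤ i + 1 ∨ (i+1) - (j+1) ≤ q := by
        intro q hq
        rcases h5 q hq with h | h
        · left; omega
        · right; omega
      by_cases hj : j + 1 = p.length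
      · -- full match found: record occurrence, fall back via lps
        simp only [if_pos hj]
        have hSMfull : p = (t.take (i+1)).drop (i + 1 - p.length) := by
          have h' := hSM1
          rw [hj, List.take_length] at h'
          exact h'
        have hocc0 : p <+: t.drop (i + 1 - p.length) := pvSuffixOcc (by omega) hSMfull
        have hlg : lps.getD (j + 1 - 1) 0 = pvBrd p p.length := by
          rw [show j + 1 - 1 = j by omega, hlps j h1, show j + 1 = p.length from hj]
        have hbl : pvBrd p p.length < p.length := pvBrd_lt p hm
        have hSMnew : p.take (pvBrd p p.length)
            = (t.take (i+1)).drop (i + 1 - pvBrd p p.length) := by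
          apply pvFallSM hm (by omega)
          rw [List.take_length]
          exact hSMfull
        have hMnew : ∀ q, p <+: t.drop q →
            q + p.length ≤ i + 1 ∨ (i+1) - pvBrd p p.length ≤ q := by
          intro q hq
          rcases hM1 q hq with h | h
          · left; exact h
          · rcases Nat.lt_or_ge q (i+1) with hqi | hqi
            · rcases Nat.lt_or_ge (i+1) (q + p.length) with hbig | hsmall
              · -- l := i+1-q is a border of p
                right
                have hl1 : 1 ≤ i + 1 - q := by omega
                have hlm : i + 1 - q ≤ p.length := by omega
                rcases Nat.eq_or_lt_of_le hlm with heq | hlt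
                · omega
                · have hs1 : p.take (i+1-q) = (t.take (i+1)).drop ((i+1) - (i+1-q)) :=
                    pvOccSuffix hq (by omega) (by omega)
                  have hs2 : p.take p.length = (t.take (i+1)).drop ((i+1) - p.length) := by
                    rw [List.take_length]; exact hSMfull
                  have hbord : pvBorderP p p.length (i+1-q) := pvNestT hs1 hs2 (by omega) (by omega)
                  have := pvBrd_max p hm hlt hbord
                  omega
              · left; omega
            · right; omega
        exact ih (i+1) (lps.getD (j + 1 - 1) 0) (acc ++ [i + 1 - (j + 1)])
          (by rw [hlg]; omega) (by rw [hlg]; omega) (by omega)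
          (by rw [hlg]; exact hSMnew) (by rw [hlg]; exact hMnew)
          (by
            rw [h6, show i + 1 + 1 - p.length = (i + 1 - p.length) + 1 by omega,
              List.range_succ, List.filter_append, show i + 1 - (j+1) = i + 1 - p.length by omega]
            simp [hocc0])
          (by rw [hlg]; omega)
      · -- no full match yet
        simp only [if_neg hj]
        have hj1m : j + 1 < p.length := by omega
        have hfilt : (List.range (i + 1 + 1 - p.length)).filter (fun q => decide (p <+: t.drop q))
            = (List.range (i + 1 - p.length)).filter (fun q => decide (p <+: t.drop q)) := by
          rcases Nat.lt_or_ge (i+1) p.length with hbig | hsmall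
          · congr 2; omega
          · rw [show i + 1 + 1 - p.length = (i + 1 - p.length) + 1 by omega, List.range_succ,
              List.filter_append]
            have hno : ¬ p <+: t.drop (i + 1 - p.length) := by
              intro hq
              rcases h5 _ hq with h | h
              · omega
              · omega
            simp [hno]
        by_cases hcond : i + 1 < t.length ∧ ¬ (p[j+1]? = t[i+1]?)
        · simp only [if_pos hcond]
          rw [if_pos (show j + 1 ≠ 0 by omega)]
          have hlg : lps.getD (j + 1 - 1) 0 = pvBrd p (j+1) := by
            rw [show j + 1 - 1 = j by omega, hlps j h1]
          have hbl : pvBrd p (j+1) < j + 1 := pvBrd_lt p (by omega)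
          have hSMnew : p.take (pvBrd p (j+1)) = (t.take (i+1)).drop (i + 1 - pvBrd p (j+1)) :=
            pvFallSM (by omega) (by omega) hSM1
          have hMnew : ∀ q, p <+: t.drop q →
              q + p.length ≤ i + 1 ∨ (i+1) - pvBrd p (j+1) ≤ q := by
            intro q hq
            rcases hM1 q hq with h | h
            · left; exact h
            · rcases Nat.lt_or_ge q (i+1) with hqi | hqi
              · rcases Nat.lt_or_ge (i+1) (q + p.length) with hbig | hsmall
                · right
                  have hl1 : 1 ≤ i + 1 - q := by omega
                  have hlj : i + 1 - q ≤ j + 1 := by omega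
                  rcases Nat.eq_or_lt_of_le hlj with heq | hlt
                  · -- i+1-q = j+1 : the characters would have to match
                    exfalso
                    have hch : p[j+1]? = t[q + (j+1)]? := pvOccChar hq hj1m
                    rw [show q + (j+1) = i + 1 by omega] at hch
                    exact hcond.2 hch
                  · have hs1 : p.take (i+1-q) = (t.take (i+1)).drop ((i+1) - (i+1-q)) :=
                      pvOccSuffix hq (by omega) (by omega)
                    have hbord : pvBorderP p (j+1) (i+1-q) := pvNestT hs1 hSM1 (by omega) (by omega)
                    have := pvBrd_max p (by omega) hlt hbord
                    omega
                · left; omega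
              · right; omega
          exact ih (i+1) (lps.getD (j + 1 - 1) 0) acc
            (by rw [hlg]; omega) (by rw [hlg]; omega) (by omega)
            (by rw [hlg]; exact hSMnew) (by rw [hlg]; exact hMnew)
            (by rw [h6, ← hfilt]) (by rw [hlg]; omega)
        · simp only [if_neg hcond]
          exact ih (i+1) (j+1) acc hj1m (by omega) (by omega) hSM1 hM1
            (by rw [h6, ← hfilt]) (by omega)
    · -- characters do not match
      simp only [if_neg hc]
      have hjm : ¬ (j = p.length) := by omega
      simp only [if_neg hjm]
      have hcond : i < t.length ∧ ¬ (p[j]? = t[i]?) := ⟨hi, hc⟩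
      simp only [if_pos hcond]
      by_cases hj0 : j = 0
      · rw [if_neg (by omega)]
        subst hj0
        have hSMnew : p.take 0 = (t.take (i+1)).drop (i + 1 - 0) := by
          simp [List.drop_eq_nil_of_le]
        have hMnew : ∀ q, p <+: t.drop q → q + p.length ≤ i + 1 ∨ (i+1) - 0 ≤ q := by
          intro q hq
          rcases h5 q hq with h | h
          · left; omega
          · rcases Nat.lt_or_ge q (i+1) with hqi | hqi
            · exfalso
              have hch : p[0]? = t[q + 0]? := pvOccChar hq hm
              rw [show q + 0 = i by omega] at hch
              exact hc hch
            · right; omega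
        have hfilt : (List.range (i + 1 + 1 - p.length)).filter (fun q => decide (p <+: t.drop q))
            = (List.range (i + 1 - p.length)).filter (fun q => decide (p <+: t.drop q)) := by
          rcases Nat.lt_or_ge (i+1) p.length with hbig | hsmall
          · congr 2; omega
          · rw [show i + 1 + 1 - p.length = (i + 1 - p.length) + 1 by omega, List.range_succ,
              List.filter_append]
            have hno : ¬ p <+: t.drop (i + 1 - p.length) := by
              intro hq
              rcases h5 _ hq with h | h
              · omega
              · have hch : p[0]? = t[(i + 1 - p.length) + 0]? := pvOccChar hq hm
                rw [show i + 1 - p.length + 0 = i by omega] at hch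
                exact hc hch
            simp [hno]
        exact ih (i+1) 0 acc h1 (by omega) (by omega) hSMnew hMnew
          (by rw [h6, ← hfilt]) (by omega)
      · rw [if_pos (show j ≠ 0 from hj0)]
        have hlg : lps.getD (j - 1) 0 = pvBrd p j := by
          rw [hlps (j-1) (by omega), show j - 1 + 1 = j by omega]
        have hbl : pvBrd p j < j := pvBrd_lt p (by omega)
        have hSMnew : p.take (pvBrd p j) = (t.take i).drop (i - pvBrd p j) :=
          pvFallSM (by omega) h2 h4
        have hMnew : ∀ q, p <+: t.drop q → q + p.length ≤ i ∨ i - pvBrd p j ≤ q := by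
          intro q hq
          rcases h5 q hq with h | h
          · left; exact h
          · rcases Nat.lt_or_ge q i with hqi | hqi
            · rcases Nat.lt_or_ge i (q + p.length) with hbig | hsmall
              · right
                have hl1 : 1 ≤ i - q := by omega
                have hlj : i - q ≤ j := by omega
                rcases Nat.eq_or_lt_of_le hlj with heq | hlt
                · exfalso
                  have hch : p[j]? = t[q + j]? := pvOccChar hq h1
                  rw [show q + j = i by omega] at hch
                  exact hc hch
                · have hs1 : p.take (i-q) = (t.take i).drop (i - (i-q)) :=
                    pvOccSuffix hq (by omega) (by omega)
                  have hbord : pvBorderP p j (i-q) := pvNestT hs1 h4 (by omega) (by omega)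
                  have := pvBrd_max p (by omega) hlt hbord
                  omega
              · left; omega
            · right; omega
        exact ih i (lps.getD (j - 1) 0) acc
          (by rw [hlg]; omega) (by rw [hlg]; omega) h3
          (by rw [hlg]; exact hSMnew) (by rw [hlg]; exact hMnew)
          h6 (by rw [hlg]; omega)

def pvOccList (t p : List Char) : List Nat :=
  (List.range (t.length + 1 - p.length)).filter (fun q => decide (p <+: t.drop q))

lemma pvKmpSearch_correct (t p : List Char) (hp : p ≠ []) :
    pvKmpSearch t p = pvOccList t p := by
  have hm : 1 ≤ p.length := List.length_pos_iff.mpr hp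
  unfold pvKmpSearch pvOccList
  apply pvKmpGo_correct t p hp _ (pvComputeLPS_correct p hp) _ 0 0 []
    (by omega) (by omega) (by omega)
    (by simp) ?_ ?_ (by omega)
  · intro q hq; right; omega
  · rw [show 0 + 1 - p.length = 0 by omega]
    simp

lemma pvInfixOfDrop {p u : List Char} {d : Nat} (h : p <+: u.drop d) : p <:+: u :=
  h.isInfix.trans (List.drop_suffix d u).isInfix

lemma pvFindAllGo_correct (t p : List Char) (hp : p ≠ []) :
    ∀ fuel start acc, start ≤ t.length → t.length + 2 - start ≤ fuel →
    pvFindAllGo t p fuel start acc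
      = acc ++ (List.range' start (t.length + 1 - start)).filter (fun q => decide (p <+: t.drop q)) := by
  have hm : 1 ≤ p.length := List.length_pos_iff.mpr hp
  intro fuel
  induction fuel with
  | zero => intro start acc h1 h2; omega
  | succ f ih =>
    intro start acc h1 h2
    rw [pvFindAllGo]
    by_cases hpos : PySem.Chars.findFrom t p (start : Int) none = -1
    · simp only [hpos]
      have hnin : ¬ p <:+: t.drop start :=
        (PySem.Chars.findFrom_natCast_eq_neg_one_iff t p start h1).mp hpos
      have hfilt : (List.range' start (t.length + 1 - start)).filter
          (fun q => decide (p <+: t.drop q)) = [] := by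
        rw [List.filter_eq_nil_iff]
        intro q hq
        simp only [decide_eq_true_eq]
        intro hocc
        apply hnin
        have hge : start ≤ q := (List.mem_range'_1.mp hq).1
        rw [show q = q - start + start by omega, Nat.add_comm, ← List.drop_drop] at hocc
        exact pvInfixOfDrop hocc
      simp [hfilt]
    · simp only [if_neg hpos]
      obtain ⟨hge, hpre, hmin⟩ := PySem.Chars.findFrom_natCast_spec t p start h1 hpos
      set r := PySem.Chars.findFrom t p (start : Int) none with hr
      have hr0 : (0 : Int) ≤ r := le_trans (Int.natCast_nonneg start) hge
      have hlen : r.toNat + p.length ≤ t.length := pvOccLen hpre hp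
      have hsr : start ≤ r.toNat := by omega
      have hrt : r.toNat < t.length := by omega
      have hsplit : List.range' start (t.length + 1 - start)
          = List.range' start (r.toNat - start) ++ List.range' r.toNat (t.length + 1 - r.toNat) := by
        have := List.range'_append (s := start) (m := r.toNat - start)
          (n := t.length + 1 - r.toNat) (step := 1)
        rw [show start + 1 * (r.toNat - start) = r.toNat by omega] at this
        rw [this]
        congr 1
        omega
      have hfilt1 : (List.range' start (r.toNat - start)).filter
          (fun q => decide (p <+: t.drop q)) = [] := by
        rw [List.filter_eq_nil_iff]
        intro q hq
        simp only [decide_eq_true_eq]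
        have hb := List.mem_range'_1.mp hq
        exact hmin q hb.1 (by omega)
      have hcons : List.range' r.toNat (t.length + 1 - r.toNat)
          = r.toNat :: List.range' (r.toNat + 1) (t.length - r.toNat) := by
        rw [show t.length + 1 - r.toNat = (t.length - r.toNat) + 1 by omega, List.range'_succ]
      rw [ih (r.toNat + 1) (acc ++ [r.toNat]) (by omega) (by omega), hsplit,
        List.filter_append, hfilt1, hcons, List.nil_append, List.filter_cons,
        if_pos (by simpa using hpre)]
      simp
  
lemma pvFindAll_correct (t p : List Char) (hp : p ≠ []) :
    pvFindAll t p = pvOccList t p := by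
  have hm : 1 ≤ p.length := List.length_pos_iff.mpr hp
  unfold pvFindAll pvOccList
  rw [pvFindAllGo_correct t p hp (t.length + 2) 0 [] (by omega) (by omega), List.nil_append,
    show t.length + 1 - 0 = t.length + 1 by omega, List.range_eq_range']
  have hsplit : List.range' 0 (t.length + 1)
      = List.range' 0 (t.length + 1 - p.length)
        ++ List.range' (t.length + 1 - p.length) (t.length + 1 - (t.length + 1 - p.length)) := by
    have := List.range'_append (s := 0) (m := t.length + 1 - p.length)
      (n := t.length + 1 - (t.length + 1 - p.length)) (step := 1)
    rw [show 0 + 1 * (t.length + 1 - p.length) = t.length + 1 - p.length by omega] at this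
    rw [this]
    congr 1
    omega
  have hfilt2 : (List.range' (t.length + 1 - p.length)
      (t.length + 1 - (t.length + 1 - p.length))).filter (fun q => decide (p <+: t.drop q)) = [] := by
    rw [List.filter_eq_nil_iff]
    intro q hq
    simp only [decide_eq_true_eq]
    intro hocc
    have hb := List.mem_range'_1.mp hq
    have := pvOccLen hocc hp
    omega
  rw [hsplit, List.filter_append, hfilt2, List.append_nil]

lemma pvAdvanceA_spec (ib : List Nat) (tgt : Int) :
    ∀ c x, ib.length - x = c → x ≤ ib.length →
    (∀ y, y < x → ((ib.getD y 0 : Nat) : Int) < tgt) →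
    x ≤ pvAdvanceA ib tgt x ∧ pvAdvanceA ib tgt x ≤ ib.length ∧
      (∀ y, y < pvAdvanceA ib tgt x → ((ib.getD y 0 : Nat) : Int) < tgt) ∧
      (pvAdvanceA ib tgt x < ib.length →
        ¬ ((ib.getD (pvAdvanceA ib tgt x) 0 : Nat) : Int) < tgt) := by
  intro c
  induction c with
  | zero =>
    intro x hc hx hlt
    rw [pvAdvanceA]
    have hxl : x = ib.length := by omega
    rw [dif_neg (by omega)]
    exact ⟨le_refl _, hx, hlt, by omega⟩
  | succ n ihc =>
    intro x hc hx hlt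
    rw [pvAdvanceA]
    by_cases h : x < ib.length ∧ ((ib.getD x 0 : Nat) : Int) < tgt
    · rw [dif_pos h]
      have := ihc (x+1) (by omega) (by omega) (by
        intro y hy
        rcases Nat.lt_or_ge y x with h' | h'
        · exact hlt y h'
        · have : y = x := by omega
          rw [this]; exact h.2)
      exact ⟨by omega, this.2.1, this.2.2.1, this.2.2.2⟩
    · rw [dif_neg h]
      refine ⟨le_refl _, hx, hlt, fun hxlen hcontra => h ⟨hxlen, hcontra⟩⟩

lemma pvLbound_spec (ib : List Nat) (tgt : Int)
    (hmono : ∀ x y, x ≤ y → y < ib.length →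
      ((ib.getD x 0 : Nat) : Int) ≤ ((ib.getD y 0 : Nat) : Int)) :
    ∀ fuel lo hi, hi - lo < fuel → lo ≤ hi → hi ≤ ib.length →
    (∀ y, y < lo → ((ib.getD y 0 : Nat) : Int) < tgt) →
    (∀ y, hi ≤ y → y < ib.length → ¬ ((ib.getD y 0 : Nat) : Int) < tgt) →
    pvLbound ib tgt fuel lo hi ≤ ib.length ∧
      (∀ y, y < pvLbound ib tgt fuel lo hi → ((ib.getD y 0 : Nat) : Int) < tgt) ∧
      (pvLbound ib tgt fuel lo hi < ib.length →
        ¬ ((ib.getD (pvLbound ib tgt fuel lo hi) 0 : Nat) : Int) < tgt) := by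
  intro fuel
  induction fuel with
  | zero => intro lo hi hc; omega
  | succ f ihc =>
    intro lo hi hc hlohi hhil hblo bhi
    rw [pvLbound]
    by_cases h : lo < hi
    · rw [if_pos h]
      simp only []
      by_cases hmid : ((ib.getD ((lo + hi) / 2) 0 : Nat) : Int) < tgt
      · rw [if_pos hmid]
        apply ihc ((lo + hi) / 2 + 1) hi (by omega) (by omega) hhil
        · intro y hy
          rcases Nat.lt_or_ge y ((lo + hi) / 2) with h' | h'
          · rcases Nat.lt_or_ge y lo with h'' | h''
            · exact hblo y h''
            · exact lt_of_le_of_lt (hmono y ((lo+hi)/2) (by omega) (by omega)) hmid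
          · have : y = (lo + hi) / 2 := by omega
            rw [this]; exact hmid
        · exact bhi
      · rw [if_neg hmid]
        apply ihc lo ((lo + hi) / 2) (by omega) (by omega) (by omega) hblo
        intro y hy hyl hcontra
        exact hmid (lt_of_le_of_lt (hmono ((lo+hi)/2) y hy hyl) hcontra)
    · rw [if_neg h]
      exact ⟨by omega, hblo, fun hl => bhi lo (by omega) hl⟩

lemma pvSelGoA_eq (ib : List Nat) (k : Int)
    (hmono : ∀ x y, x ≤ y → y < ib.length →
      ((ib.getD x 0 : Nat) : Int) ≤ ((ib.getD y 0 : Nat) : Int)) :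
    ∀ (ia : List Nat) (b0 : Nat) (ans : List Int), b0 ≤ ib.length →
    (∀ (i : Nat), i ∈ ia → ∀ y, y < b0 → ((ib.getD y 0 : Nat) : Int) < (i : Int) - k) →
    List.Pairwise (· ≤ ·) ia →
    pvSelGoA ib k ia b0 ans
      = ia.foldl (fun (ans : List Int) (i : Nat) =>
          let lo := pvLbound ib ((i : Int) - k) (ib.length + 1) 0 ib.length
          if lo < ib.length ∧ ((ib.getD lo 0 : Nat) : Int) ≤ (i : Int) + k then ans ++ [(i : Int)]
          else ans) ans := by
  intro ia
  induction ia with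
  | nil => intro b0 ans _ _ _; simp [pvSelGoA]
  | cons i rest ihr =>
    intro b0 ans hb0 hbelow hpw
    rw [pvSelGoA, List.foldl_cons]
    obtain ⟨hple, hptail⟩ := List.pairwise_cons.mp hpw
    obtain ⟨hA1, hA2, hA3, hA4⟩ := pvAdvanceA_spec ib ((i : Int) - k) (ib.length - b0) b0 rfl hb0
      (fun y hy => hbelow i (by simp) y hy)
    obtain ⟨hL1, hL2, hL3⟩ := pvLbound_spec ib ((i : Int) - k) hmono (ib.length + 1) 0 ib.length
      (by omega) (by omega) (le_refl _) (by omega) (fun y h1 h2 => by omega)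
    set r := pvAdvanceA ib ((i : Int) - k) b0 with hr
    set lo := pvLbound ib ((i : Int) - k) (ib.length + 1) 0 ib.length with hlo
    have hrl : r = lo := by
      rcases Nat.lt_trichotomy r lo with h | h | h
      · exact absurd (hL2 r h) (hA4 (by omega))
      · exact h
      · exact absurd (hA3 lo h) (hL3 (by omega))
    have hcond : (r < ib.length ∧ |((ib.getD r 0 : Nat) : Int) - (i : Int)| ≤ k)
        ↔ (lo < ib.length ∧ ((ib.getD lo 0 : Nat) : Int) ≤ (i : Int) + k) := by
      rw [← hrl]
      constructor
      · rintro ⟨h1, h2⟩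
        rw [abs_le] at h2
        exact ⟨h1, by omega⟩
      · rintro ⟨h1, h2⟩
        have := hA4 h1
        rw [abs_le]
        exact ⟨h1, by omega⟩
    rw [ihr r (if r < ib.length ∧ |((ib.getD r 0 : Nat) : Int) - (i : Int)| ≤ k
          then ans ++ [(i : Int)] else ans) hA2 ?_ hptail]
    · congr 1
      simp only []
      rw [if_congr hcond rfl rfl]
    · intro i' hi' y hy
      have h1 := hA3 y hy
      have h2 : (i : Int) ≤ (i' : Int) := by exact_mod_cast hple i' hi'
      omega


lemma pvOccList_pairwise (t p : List Char) : (pvOccList t p).Pairwise (· < ·) :=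
  List.Pairwise.sublist List.filter_sublist List.pairwise_lt_range

lemma pvOccList_mono (t p : List Char) :
    ∀ x y, x ≤ y → y < (pvOccList t p).length →
      (((pvOccList t p).getD x 0 : Nat) : Int) ≤ (((pvOccList t p).getD y 0 : Nat) : Int) := by
  intro x y hxy hy
  rcases Nat.eq_or_lt_of_le hxy with h | h
  · rw [h]
  · have hpw := List.pairwise_iff_getElem.mp (pvOccList_pairwise t p) x y (by omega) hy h
    rw [List.getD_eq_getElem _ 0 (by omega), List.getD_eq_getElem _ 0 hy]
    exact_mod_cast le_of_lt hpw

-- ===== VERDICT (by name: the statement is the Claim_ definition above) =====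
theorem beautifulIndices_spec : Claim_equal_beautifulIndices := by
  intro s a b k hdom hpre
  unfold Spec_beautifulIndices
  obtain ⟨ha, hb⟩ := hpre
  have ha' : a.toList ≠ [] := fun h => ha (String.toList_eq_nil_iff.mp h)
  have hb' : b.toList ≠ [] := fun h => hb (String.toList_eq_nil_iff.mp h)
  simp only [beautifulIndices, beautifulIndices_alt]
  rw [pvKmpSearch_correct _ _ ha', pvKmpSearch_correct _ _ hb',
    pvFindAll_correct _ _ ha', pvFindAll_correct _ _ hb']
  apply pvSelGoA_eq (pvOccList s.toList b.toList) k (pvOccList_mono s.toList b.toList)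
    (pvOccList s.toList a.toList) 0 [] (by omega) (fun i _ y hy => by omega)
    ((pvOccList_pairwise s.toList a.toList).imp le_of_lt)
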